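-- pv_equiv track=rewrite | github.com/gorapang/HMM-POS-Tagger | hmm.py | count_tags_and_pairs
-- ===== SOURCE A (Python) =====
-- from collections import defaultdict, Counter
-- from itertools import tee
--
-- def count_tags_and_pairs(train):
--     tag_cnt = Counter()
--     word_tag_cnt = defaultdict(Counter)
--     tag_initial_cnt = Counter()
--
--     # tag_cnt, word_tag_cnt, tag_initial_cnt 계산
--     for sentence in train:
--         prev_tag = 'START'
--         for index, (word, tag) in enumerate(sentence):
--             tag_cnt[tag] += 1
--             word_tag_cnt[word][tag] += 1
--             prev_tag = tag
--             if index == 0: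
--                 tag_initial_cnt[tag] += 1
--
--     # tag_pair_cnt 계산
--     def pairwise(iterable):
--         a, b = tee(iterable)
--         next(b, None)
--         return zip(a, b)
--
--     tag_pair_cnt = {prev: Counter() for prev in tag_cnt}  # 초기화
--     temp_tag_counter = Counter()
--
--     for sentence in train:
--         tag_list = [tag for _, tag in sentence]  # 각 문장에서 태그만 리스트로 저장
--         # 인접한 태그 둘 간의 전이 횟수 계산
--         for prev, next_tag in pairwise(tag_list):
--             tag_pair_cnt[prev].update([next_tag])
--             temp_tag_counter.update([prev])
--
--     return tag_cnt, word_tag_cnt, tag_initial_cnt, tag_pair_cnt, temp_tag_counter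
-- ===== SOURCE B (Python) =====
-- from collections import Counter
--
--
-- def count_tags_and_pairs(train):
--     # Flatten the corpus once, count everything with Counter(iterable),
--     # then obtain the nested tables by grouping a pair-Counter's items.
--     flat = [wt for s in train for wt in s]
--     pairs = [p for s in train
--                for p in zip([t for _, t in s], [t for _, t in s][1:])]
--
--     tag_cnt = Counter(t for _, t in flat)
--     tag_initial_cnt = Counter(s[0][1] for s in train if s)
--     temp_tag_counter = Counter(p for p, _ in pairs)
--
--     def group(items):
--         g = {}
--         for (k1, k2), c in Counter(items).items():
--             g.setdefault(k1, Counter())[k2] = c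
--         return g
--
--     word_tag_cnt = group(flat)
--     trans = group(pairs)
--     tag_pair_cnt = {t: trans.get(t, Counter()) for t in tag_cnt}
--     return tag_cnt, word_tag_cnt, tag_initial_cnt, tag_pair_cnt, temp_tag_counter
-- ===== Notes on version B (the rewrite author's own statement) =====
-- stated objective: alternative
-- what changed: A builds all tables by incremental nested Counter updates in two loops over train; B flattens the corpus into flat word-tag and tag-pair lists, counts each with Counter(iterable), and derives the nested tables by grouping the pair-Counters' items.
import Mathlib
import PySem

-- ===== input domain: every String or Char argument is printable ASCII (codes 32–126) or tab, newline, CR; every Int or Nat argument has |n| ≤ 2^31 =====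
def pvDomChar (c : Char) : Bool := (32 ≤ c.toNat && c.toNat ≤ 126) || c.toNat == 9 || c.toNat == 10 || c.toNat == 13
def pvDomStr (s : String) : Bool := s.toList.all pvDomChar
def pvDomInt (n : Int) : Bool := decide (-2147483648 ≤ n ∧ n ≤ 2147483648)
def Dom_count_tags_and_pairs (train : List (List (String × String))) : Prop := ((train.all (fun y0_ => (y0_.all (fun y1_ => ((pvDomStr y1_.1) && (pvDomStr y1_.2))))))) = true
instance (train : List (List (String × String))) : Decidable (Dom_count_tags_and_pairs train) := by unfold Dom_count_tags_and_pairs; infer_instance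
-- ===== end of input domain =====

-- B replaces A's incremental nested-Counter updates (two loops over train) with a flatten-count-group
-- pipeline: flat tag/pair lists, Counter(iterable) on each, nested tables by grouping a pair-Counter's items
-- (objective: alternative decomposition, same cost).

-- ===== PORT A =====
-- A's first loop body: enumerate index/word/tag; `Counter[x] += 1` and `defaultdict(Counter)[w][t] += 1` are Dict.modify.
def pvA_step1
    (st : ((PySem.Dict String Int) × (PySem.Dict String (PySem.Dict String Int)) × (PySem.Dict String Int)) × String)
    (iwt : Int × (String × String)) :
    ((PySem.Dict String Int) × (PySem.Dict String (PySem.Dict String Int)) × (PySem.Dict String Int)) × String :=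
  let acc := st.1
  let tag_cnt := acc.1.modify iwt.2.2 0 (· + 1)
  let word_tag_cnt := acc.2.1.modify iwt.2.1 PySem.Dict.empty (fun c => c.modify iwt.2.2 0 (· + 1))
  let tag_initial_cnt := if iwt.1 == 0 then acc.2.2.modify iwt.2.2 0 (· + 1) else acc.2.2
  ((tag_cnt, word_tag_cnt, tag_initial_cnt), iwt.2.2)

-- A's second loop body: `tag_pair_cnt[prev].update([next]); temp_tag_counter.update([prev])`.
-- `tag_pair_cnt[prev]` is a plain-dict lookup; ported as modify with default ∅, exact because prev is
-- always a tag counted in tag_cnt, hence a key of tag_pair_cnt (proved below, lemma tc_keys / key_mem).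
def pvA_step2 (acc : (PySem.Dict String (PySem.Dict String Int)) × PySem.Dict String Int)
    (pr : String × String) : (PySem.Dict String (PySem.Dict String Int)) × PySem.Dict String Int :=
  (acc.1.modify pr.1 PySem.Dict.empty (fun c => c.modify pr.2 0 (· + 1)), acc.2.modify pr.1 0 (· + 1))

def count_tags_and_pairs (train : List (List (String × String))) : (List (String × Int)) × (List (String × List (String × Int))) × (List (String × Int)) × (List (String × List (String × Int))) × (List (String × Int)) :=
  -- first loop: tag_cnt, word_tag_cnt, tag_initial_cnt (prev_tag is tracked but unused, as in A)
  let p1 := train.foldl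
    (fun acc sentence => ((PySem.List.enumerate sentence).foldl pvA_step1 (acc, "START")).1)
    (PySem.Dict.empty, PySem.Dict.empty, PySem.Dict.empty)
  -- tag_pair_cnt = {prev: Counter() for prev in tag_cnt}
  let tag_pair0 := p1.1.keys.foldl (fun d prev => d.insert prev PySem.Dict.empty) PySem.Dict.empty
  -- second loop over pairwise(tag_list) = zip(tag_list, tag_list[1:])
  let p2 := train.foldl
    (fun acc sentence =>
      let tag_list := sentence.map (fun x => x.2)
      (tag_list.zip (tag_list.drop 1)).foldl pvA_step2 acc)
    (tag_pair0, PySem.Dict.empty)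
  (p1.1.items, p1.2.1.items.map (fun q => (q.1, q.2.items)), p1.2.2.items,
   p2.1.items.map (fun q => (q.1, q.2.items)), p2.2.items)

-- ===== PORT B =====
-- B's `group(items)`: iterate Counter(items).items(); `g.setdefault(k1, Counter())[k2] = c` is modify k1 ∅ (insert k2 c).
def pvGroup (items : List (String × String)) : PySem.Dict String (PySem.Dict String Int) :=
  (PySem.Dict.counter items).items.foldl
    (fun g p => g.modify p.1.1 PySem.Dict.empty (fun inner => inner.insert p.1.2 p.2))
    PySem.Dict.empty

def count_tags_and_pairs_alt (train : List (List (String × String))) : (List (String × Int)) × (List (String × List (String × Int))) × (List (String × Int)) × (List (String × List (String × Int))) × (List (String × Int)) :=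
  -- flat = [wt for s in train for wt in s];  pairs = [p for s in train for p in zip(tags, tags[1:])]
  let flat := train.flatMap (fun s => s)
  let pairs := train.flatMap (fun s => (s.map (fun x => x.2)).zip ((s.map (fun x => x.2)).drop 1))
  let tag_cnt := PySem.Dict.counter (flat.map (fun x => x.2))
  -- Counter(s[0][1] for s in train if s)
  let tag_initial_cnt := PySem.Dict.counter
    (train.filterMap (fun s => match s with | [] => none | x :: _ => some x.2))
  let temp_tag_counter := PySem.Dict.counter (pairs.map (fun p => p.1))
  let word_tag_cnt := pvGroup flat
  let trans := pvGroup pairs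
  -- tag_pair_cnt = {t: trans.get(t, Counter()) for t in tag_cnt}
  let tag_pair_cnt := tag_cnt.keys.foldl
    (fun d t => d.insert t (trans.getD t PySem.Dict.empty)) PySem.Dict.empty
  (tag_cnt.items, word_tag_cnt.items.map (fun q => (q.1, q.2.items)), tag_initial_cnt.items,
   tag_pair_cnt.items.map (fun q => (q.1, q.2.items)), temp_tag_counter.items)

-- ===== PRECONDITION & SPEC =====
def Spec_count_tags_and_pairs (train : List (List (String × String))) (out : (List (String × Int)) × (List (String × List (String × Int))) × (List (String × Int)) × (List (String × List (String × Int))) × (List (String × Int))) : Prop := out = count_tags_and_pairs_alt train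
instance (train : List (List (String × String))) (out : (List (String × Int)) × (List (String × List (String × Int))) × (List (String × Int)) × (List (String × List (String × Int))) × (List (String × Int))) : Decidable (Spec_count_tags_and_pairs train out) := by unfold Spec_count_tags_and_pairs; exact @instDecidableEqProd _ _ inferInstance (@instDecidableEqProd _ _ inferInstance (@instDecidableEqProd _ _ inferInstance inferInstance)) _ _

-- ===== CLAIM (what is proved, stated in full; the proofs are below) =====
def Claim_equal_count_tags_and_pairs : Prop := ∀ (train : List (List (String × String))), Dom_count_tags_and_pairs train → Spec_count_tags_and_pairs train (count_tags_and_pairs train)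

-- ===== LEMMAS AND PROOFS =====

-- canonical per-sentence folds A's port is reduced to
def cBump (d : PySem.Dict String Int) (t : String) : PySem.Dict String Int := d.modify t 0 (· + 1)

def cTC (d : PySem.Dict String Int) (s : List (String × String)) : PySem.Dict String Int :=
  s.foldl (fun d x => cBump d x.2) d

def nestStep (w : PySem.Dict String (PySem.Dict String Int)) (x : String × String) :
    PySem.Dict String (PySem.Dict String Int) :=
  w.modify x.1 PySem.Dict.empty (fun c => cBump c x.2)

def cWT (w : PySem.Dict String (PySem.Dict String Int)) (s : List (String × String)) :
    PySem.Dict String (PySem.Dict String Int) :=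
  s.foldl nestStep w

def cTI (d : PySem.Dict String Int) (s : List (String × String)) : PySem.Dict String Int :=
  match s with | [] => d | x :: _ => cBump d x.2

def sPairs (s : List (String × String)) : List (String × String) :=
  (s.map (fun x => x.2)).zip ((s.map (fun x => x.2)).drop 1)

def cTM (d : PySem.Dict String Int) (l : List (String × String)) : PySem.Dict String Int :=
  l.foldl (fun d pr => cBump d pr.1) d

-- whole-train folds
def tTC (d : PySem.Dict String Int) (train : List (List (String × String))) : PySem.Dict String Int :=
  train.foldl cTC d
def tWT (w : PySem.Dict String (PySem.Dict String Int)) (train : List (List (String × String))) :=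
  train.foldl cWT w
def tTI (d : PySem.Dict String Int) (train : List (List (String × String))) : PySem.Dict String Int :=
  train.foldl cTI d
def tTR (w : PySem.Dict String (PySem.Dict String Int)) (train : List (List (String × String))) :=
  train.foldl (fun w s => cWT w (sPairs s)) w
def tTM (d : PySem.Dict String Int) (train : List (List (String × String))) : PySem.Dict String Int :=
  train.foldl (fun d s => cTM d (sPairs s)) d

theorem innerA_tail (xs : List (String × String)) (i : Int) (hi : 1 ≤ i)
    (a : PySem.Dict String Int) (b : PySem.Dict String (PySem.Dict String Int))
    (c : PySem.Dict String Int) (p : String) :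
    ((PySem.List.enumerate xs i).foldl pvA_step1 ((a, b, c), p)).1 = (cTC a xs, cWT b xs, c) := by
  induction xs generalizing i a b c p with
  | nil => simp [PySem.List.enumerate_nil, cTC, cWT]
  | cons x xs ih =>
    have hne : (i == 0) = false := by simp; omega
    rw [PySem.List.enumerate_cons, List.foldl_cons]
    show ((PySem.List.enumerate xs (i + 1)).foldl pvA_step1 (pvA_step1 ((a, b, c), p) (i, x))).1 = _
    simp only [pvA_step1, hne, Bool.false_eq_true, if_false]
    rw [ih (i + 1) (by omega)]
    simp [cTC, cWT, nestStep, cBump]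

theorem innerA (s : List (String × String))
    (a : PySem.Dict String Int) (b : PySem.Dict String (PySem.Dict String Int))
    (c : PySem.Dict String Int) (p : String) :
    ((PySem.List.enumerate s).foldl pvA_step1 ((a, b, c), p)).1 = (cTC a s, cWT b s, cTI c s) := by
  cases s with
  | nil => simp [PySem.List.enumerate_nil, cTC, cWT, cTI]
  | cons x xs =>
    rw [PySem.List.enumerate_cons, List.foldl_cons]
    show ((PySem.List.enumerate xs (0 + 1)).foldl pvA_step1 (pvA_step1 ((a, b, c), p) (0, x))).1 = _
    simp only [pvA_step1]
    rw [innerA_tail xs (0 + 1) (by omega)]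
    simp [cTC, cWT, cTI, nestStep, cBump]

theorem outerA1 (train : List (List (String × String)))
    (a : PySem.Dict String Int) (b : PySem.Dict String (PySem.Dict String Int))
    (c : PySem.Dict String Int) :
    train.foldl (fun acc sentence => ((PySem.List.enumerate sentence).foldl pvA_step1 (acc, "START")).1) (a, b, c) =
      (tTC a train, tWT b train, tTI c train) := by
  induction train generalizing a b c with
  | nil => simp [tTC, tWT, tTI]
  | cons s tr ih =>
    rw [List.foldl_cons]
    show tr.foldl _ (((PySem.List.enumerate s).foldl pvA_step1 ((a, b, c), "START")).1) = _
    rw [innerA, ih]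
    simp [tTC, tWT, tTI]

theorem innerA2 (l : List (String × String))
    (d : PySem.Dict String (PySem.Dict String Int)) (e : PySem.Dict String Int) :
    l.foldl pvA_step2 (d, e) = (cWT d l, cTM e l) := by
  induction l generalizing d e with
  | nil => simp [cWT, cTM]
  | cons pr l ih => rw [List.foldl_cons]; show l.foldl pvA_step2 (pvA_step2 (d, e) pr) = _;
                    simp only [pvA_step2]; rw [ih]; simp [cWT, cTM, nestStep, cBump]

theorem outerA2 (train : List (List (String × String)))
    (d : PySem.Dict String (PySem.Dict String Int)) (e : PySem.Dict String Int) :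
    train.foldl (fun acc sentence =>
        let tag_list := sentence.map (fun x => x.2)
        (tag_list.zip (tag_list.drop 1)).foldl pvA_step2 acc) (d, e) =
      (tTR d train, tTM e train) := by
  induction train generalizing d e with
  | nil => simp [tTR, tTM]
  | cons s tr ih =>
    rw [List.foldl_cons]
    show tr.foldl _ (((s.map (fun x => x.2)).zip ((s.map (fun x => x.2)).drop 1)).foldl pvA_step2 (d, e)) = _
    rw [show ((s.map (fun x => x.2)).zip ((s.map (fun x => x.2)).drop 1)) = sPairs s from rfl]
    rw [innerA2, ih]
    simp [tTR, tTM]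

-- a left fold over a flatMap is the nested fold
theorem foldl_flatMap {α β γ : Type} (l : List α) (g : α → List β) (f : γ → β → γ) (a : γ) :
    (l.flatMap g).foldl f a = l.foldl (fun a s => (g s).foldl f a) a := by
  induction l generalizing a with
  | nil => rfl
  | cons s tr ih => rw [List.flatMap_cons, List.foldl_append, List.foldl_cons, ih]

-- the three flat counters are A's whole-train folds
theorem tTC_eq_counter (train : List (List (String × String))) :
    tTC PySem.Dict.empty train =
      PySem.Dict.counter ((train.flatMap (fun s => s)).map (fun x => x.2)) := by
  rw [PySem.Dict.counter_eq_foldl, List.foldl_map, foldl_flatMap]; rfl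

theorem tTM_eq_counter (train : List (List (String × String))) :
    tTM PySem.Dict.empty train =
      PySem.Dict.counter ((train.flatMap sPairs).map (fun p => p.1)) := by
  rw [PySem.Dict.counter_eq_foldl, List.foldl_map, foldl_flatMap]; rfl

theorem tTI_eq_counter (train : List (List (String × String))) :
    tTI PySem.Dict.empty train =
      PySem.Dict.counter (train.filterMap (fun s => match s with | [] => none | x :: _ => some x.2)) := by
  rw [PySem.Dict.counter_eq_foldl]
  suffices h : ∀ (d : PySem.Dict String Int), tTI d train =
      (train.filterMap (fun s => match s with | [] => none | x :: _ => some x.2)).foldl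
        (fun d x => d.modify x 0 (· + 1)) d by exact h _
  induction train with
  | nil => intro d; rfl
  | cons s tr ih =>
    intro d
    cases s with
    | nil => simpa [tTI, cTI] using ih d
    | cons x xs => simpa [tTI, cTI, cBump] using ih (cBump d x.2)

-- A's nested tables are single folds over the flat lists
theorem tWT_eq_nest (train : List (List (String × String))) :
    tWT PySem.Dict.empty train = (train.flatMap (fun s => s)).foldl nestStep PySem.Dict.empty := by
  rw [foldl_flatMap]; rfl

theorem tTR_eq_nest (train : List (List (String × String)))
    (w : PySem.Dict String (PySem.Dict String Int)) :
    tTR w train = (train.flatMap sPairs).foldl nestStep w := by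
  rw [foldl_flatMap]; rfl

-- ===== nest = group : the central lemma =====

-- getD through a nest fold
theorem nest_getD (l : List (String × String)) (d : PySem.Dict String (PySem.Dict String Int)) (w : String) :
    (l.foldl nestStep d).getD w PySem.Dict.empty =
      ((l.filter (fun x => x.1 == w)).map (fun x => x.2)).foldl cBump (d.getD w PySem.Dict.empty) := by
  induction l generalizing d with
  | nil => rfl
  | cons x xs ih =>
    rw [List.foldl_cons, ih]
    by_cases hx : x.1 = w
    · simp [nestStep, hx]
    · simp [nestStep, PySem.Dict.getD_modify, hx, Ne.symm hx]

-- getD through the group fold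
theorem group_getD (items : List ((String × String) × Int))
    (d : PySem.Dict String (PySem.Dict String Int)) (w : String) :
    (items.foldl (fun g p => g.modify p.1.1 PySem.Dict.empty (fun inner => inner.insert p.1.2 p.2)) d).getD w PySem.Dict.empty =
      (items.filter (fun p => p.1.1 == w)).foldl
        (fun inner p => inner.insert p.1.2 p.2) (d.getD w PySem.Dict.empty) := by
  induction items generalizing d with
  | nil => rfl
  | cons p ps ih =>
    rw [List.foldl_cons, ih]
    by_cases hp : p.1.1 = w
    · simp [hp]
    · simp [PySem.Dict.getD_modify, hp, Ne.symm hp]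

theorem ofList_map_ofList {α β : Type} [BEq α] [LawfulBEq α] [BEq β] [LawfulBEq β]
    (m : List α) (f : α → β) :
    PySem.Set.ofList ((PySem.Set.ofList m).map f) = PySem.Set.ofList (m.map f) := by
  induction m using List.reverseRecOn with
  | nil => rfl
  | append_singleton m x ih =>
    rw [PySem.Set.ofList_append_singleton]
    by_cases hx : x ∈ PySem.Set.ofList m
    · rw [PySem.Set.add_of_mem hx, ih, List.map_append, List.map_singleton,
        PySem.Set.ofList_append_singleton, PySem.Set.add_of_mem]
      rw [PySem.Set.mem_ofList]
      exact List.mem_map_of_mem ((PySem.Set.mem_ofList m x).1 hx)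
    · rw [PySem.Set.add_of_not_mem hx, List.map_append, List.map_append,
        List.map_singleton,
        PySem.Set.ofList_append_singleton, PySem.Set.ofList_append_singleton, ih]

-- the deduped tag list of the pairs with first component w
theorem dedup_filter_snd (l : List (String × String)) (w : String) :
    PySem.Set.ofList ((l.filter (fun x => x.1 == w)).map (fun x => x.2)) =
      ((PySem.Set.ofList l).filter (fun x => x.1 == w)).map (fun x => x.2) := by
  induction l using List.reverseRecOn with
  | nil => rfl
  | append_singleton m x ih =>
    rw [List.filter_append, PySem.Set.ofList_append_singleton]
    by_cases hw : x.1 = w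
    · simp only [List.filter_cons, hw, beq_self_eq_true, if_true, List.filter_nil, List.map_append,
        List.map_cons, List.map_nil, PySem.Set.ofList_append_singleton]
      by_cases hx : x ∈ PySem.Set.ofList m
      · rw [PySem.Set.add_of_mem hx, ih, PySem.Set.add_of_mem]
        refine List.mem_map.2 ⟨x, ?_, rfl⟩
        simp [List.mem_filter, hx, hw]
      · rw [PySem.Set.add_of_not_mem hx, List.filter_append, List.map_append, ih,
          PySem.Set.add_of_not_mem]
        · simp [hw]
        · intro hmem
          obtain ⟨y, hy, hy2⟩ := List.mem_map.1 hmem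
          have hy1 : y.1 = w := by simpa using (List.mem_filter.1 hy).2
          have hyx : y = x := Prod.ext (hy1.trans hw.symm) hy2
          exact hx (hyx ▸ (List.mem_filter.1 hy).1)
    · simp only [List.filter_cons]
      by_cases hx : x ∈ PySem.Set.ofList m
      · rw [PySem.Set.add_of_mem hx]
        simpa [hw] using ih
      · rw [PySem.Set.add_of_not_mem hx, List.filter_append]
        simpa [List.filter_cons, hw] using ih
  
-- counting a tag within word w's occurrences = counting the pair
theorem count_filter_snd (l : List (String × String)) (k : String × String) :
    ((l.filter (fun x => x.1 == k.1)).map (fun x => x.2)).count k.2 = l.count k := by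
  induction l with
  | nil => rfl
  | cons y ys ih =>
    by_cases h1 : y.1 = k.1
    · by_cases h2 : y.2 = k.2
      · have heq : y = k := Prod.ext h1 h2
        simp [heq, ih]
      · have hne : ¬ y = k := fun h => h2 (by rw [h])
        simp [h1, h2, hne, ih]
    · have hne : ¬ y = k := fun h => h1 (by rw [h])
      simp [h1, hne, ih]

theorem nest_eq_group (l : List (String × String)) :
    l.foldl nestStep PySem.Dict.empty = pvGroup l := by
  have hndK : (l.foldl nestStep PySem.Dict.empty).keys.Nodup := by
    unfold nestStep
    exact PySem.Dict.nodup_keys_foldl_modify_key l (fun x => x.1) PySem.Dict.empty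
      (fun w x => fun c => cBump c x.2) PySem.Dict.empty (by simp)
  have hndK' : (pvGroup l).keys.Nodup := by
    unfold pvGroup
    exact PySem.Dict.nodup_keys_foldl_modify_key _ (fun p : (String × String) × Int => p.1.1) PySem.Dict.empty
      (fun g (p : (String × String) × Int) => fun inner => inner.insert p.1.2 p.2) PySem.Dict.empty (by simp)
  have hkeys : (l.foldl nestStep PySem.Dict.empty).keys = (pvGroup l).keys := by
    unfold nestStep pvGroup
    rw [PySem.Dict.keys_foldl_modify_key l (fun x => x.1) PySem.Dict.empty
      (fun w x => fun c => cBump c x.2) PySem.Dict.empty]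
    rw [PySem.Dict.keys_foldl_modify_key _ (fun p : (String × String) × Int => p.1.1) PySem.Dict.empty
      (fun g (p : (String × String) × Int) => fun inner => inner.insert p.1.2 p.2) PySem.Dict.empty]
    rw [PySem.Dict.keys_empty, PySem.Set.update_nil_left, PySem.Set.update_nil_left]
    rw [PySem.Dict.items_counter]
    rw [show (((PySem.Set.ofList l).map (fun k => (k, (l.count k : Int)))).map (fun p => p.1.1))
        = (PySem.Set.ofList l).map (fun k => k.1) by simp]
    exact (ofList_map_ofList l (fun k => k.1)).symm
  have hgetD : ∀ w, (l.foldl nestStep PySem.Dict.empty).getD w PySem.Dict.empty =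
      (pvGroup l).getD w PySem.Dict.empty := by
    intro w
    rw [nest_getD, pvGroup, group_getD, PySem.Dict.getD_empty]
    rw [PySem.Dict.items_counter, List.filter_map]
    have hfil : ((PySem.Set.ofList l).filter
        ((fun p : (String × String) × Int => p.1.1 == w) ∘ (fun k => (k, (l.count k : Int)))))
        = (PySem.Set.ofList l).filter (fun x => x.1 == w) := rfl
    rw [hfil]
    set D := (PySem.Set.ofList l).filter (fun x => x.1 == w) with hD
    have hDmem : ∀ x ∈ D, x.1 = w := by
      intro x hx; simpa using (List.mem_filter.1 hx).2
    have hDnd : D.Nodup := (PySem.Set.nodup_ofList l).filter _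
    have hsndnd : (D.map (fun x => x.2)).Nodup := by
      refine (List.nodup_map_iff_inj_on hDnd).2 ?_
      intro x hx y hy hxy
      exact Prod.ext ((hDmem x hx).trans (hDmem y hy).symm) hxy
    -- right side: a fold of fresh inserts over D
    have hR : (List.foldl (fun inner p => inner.insert p.1.2 p.2) PySem.Dict.empty
          (D.map (fun k => (k, (l.count k : Int)))))
        = D.foldl (fun inner k => inner.insert k.2 (l.count k : Int)) PySem.Dict.empty := by
      rw [List.foldl_map]
    rw [hR]
    -- left side: the counter of w's tag list
    have hleft : List.foldl cBump PySem.Dict.empty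
          ((l.filter (fun x => x.1 == w)).map (fun x => x.2))
        = PySem.Dict.counter ((l.filter (fun x => x.1 == w)).map (fun x => x.2)) := by
      rw [PySem.Dict.counter_eq_foldl]; rfl
    rw [hleft]
    apply PySem.Dict.ext
    rw [PySem.Dict.items_counter, dedup_filter_snd]
    have hfresh : ∀ a ∈ D, (PySem.Dict.empty : PySem.Dict String Int).contains a.2 = false := by
      intro a _; simp [PySem.Dict.contains_empty]
    have hins := PySem.Dict.items_foldl_insert_fresh (l := D) (k := fun a => a.2)
      (v := fun a => (l.count a : Int)) (d := PySem.Dict.empty) hfresh hsndnd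
    rw [hins, show (PySem.Dict.empty : PySem.Dict String Int).items = [] from rfl, List.nil_append]
    simp only [List.map_map]
    refine List.map_congr_left ?_
    intro k hk
    have hk1 : k.1 = w := hDmem k hk
    simp only [Function.comp]
    rw [← hk1, count_filter_snd l k]
  -- assemble: items are keys.map (getD)
  apply PySem.Dict.ext
  rw [PySem.Dict.items_eq_map_keys _ hndK PySem.Dict.empty,
    PySem.Dict.items_eq_map_keys _ hndK' PySem.Dict.empty, hkeys]
  exact List.map_congr_left (fun k _ => by rw [hgetD k])

-- keys of the tag counter (A side initialisation of tag_pair_cnt)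
theorem tc_keys (train : List (List (String × String))) (d : PySem.Dict String Int) :
    (tTC d train).keys =
      PySem.Set.update d.keys (train.flatMap (fun s => s.map (fun x => x.2))) := by
  induction train generalizing d with
  | nil => simp [tTC, PySem.Set.update]
  | cons s tr ih =>
    rw [tTC, List.foldl_cons]
    rw [show tr.foldl cTC (cTC d s) = tTC (cTC d s) tr from rfl, ih]
    rw [show cTC d s = s.foldl (fun d x => d.modify x.2 0 (· + 1)) d from rfl]
    rw [PySem.Dict.keys_foldl_modify_key]
    simp [PySem.Set.update, List.foldl_append]

-- a pair's first component is a tag occurring in the train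
theorem key_mem (train : List (List (String × String))) (s : List (String × String))
    (hs : s ∈ train) (pr : String × String) (hp : pr ∈ sPairs s) :
    pr.1 ∈ train.flatMap (fun sen => sen.map (fun x => x.2)) := by
  obtain ⟨p1, p2⟩ := pr
  have h1 : p1 ∈ s.map (fun x => x.2) := (List.of_mem_zip hp).1
  exact List.mem_flatMap.2 ⟨s, hs, h1⟩

theorem set_update_of_subset (l : List String) (s : List String) (h : ∀ x ∈ l, x ∈ s) :
    PySem.Set.update s l = s := by
  induction l generalizing s with
  | nil => rfl
  | cons x l ih =>
    rw [PySem.Set.update, List.foldl_cons]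
    have hx : PySem.Set.add s x = s := by
      simp [PySem.Set.add, PySem.Set.contains, h x (by simp)]
    rw [hx]
    exact ih s (fun y hy => h y (by simp [hy]))

-- getD through the transition fold depends only on getD of the start dict
theorem cWT_getD_congr (l : List (String × String))
    (d d' : PySem.Dict String (PySem.Dict String Int))
    (h : ∀ t, d.getD t PySem.Dict.empty = d'.getD t PySem.Dict.empty) (t : String) :
    (cWT d l).getD t PySem.Dict.empty = (cWT d' l).getD t PySem.Dict.empty := by
  induction l generalizing d d' with
  | nil => exact h t
  | cons pr l ih =>
    rw [cWT, List.foldl_cons, cWT, List.foldl_cons]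
    refine ih _ _ (fun u => ?_) 
    simp only [nestStep]
    rw [PySem.Dict.getD_modify, PySem.Dict.getD_modify]
    split_ifs with hu
    · rw [h pr.1]
    · exact h u

theorem tTR_getD_congr (train : List (List (String × String)))
    (d d' : PySem.Dict String (PySem.Dict String Int))
    (h : ∀ t, d.getD t PySem.Dict.empty = d'.getD t PySem.Dict.empty) (t : String) :
    (tTR d train).getD t PySem.Dict.empty = (tTR d' train).getD t PySem.Dict.empty := by
  induction train generalizing d d' with
  | nil => exact h t
  | cons s tr ih =>
    rw [tTR, List.foldl_cons, tTR, List.foldl_cons]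
    exact ih _ _ (fun u => cWT_getD_congr (sPairs s) d d' h u)

theorem initD_getD (K : List String) (t : String) :
    (((K.foldl (fun d k => d.insert k PySem.Dict.empty) PySem.Dict.empty)
        : PySem.Dict String (PySem.Dict String Int)).getD t PySem.Dict.empty) = PySem.Dict.empty := by
  suffices h : ∀ (d : PySem.Dict String (PySem.Dict String Int)),
      d.getD t PySem.Dict.empty = PySem.Dict.empty →
      ((K.foldl (fun d k => d.insert k PySem.Dict.empty) d).getD t PySem.Dict.empty) = PySem.Dict.empty by
    exact h PySem.Dict.empty (by simp [PySem.Dict.getD_empty])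
  induction K with
  | nil => intro d hd; exact hd
  | cons k K ih =>
    intro d hd
    rw [List.foldl_cons]
    refine ih _ ?_
    rw [PySem.Dict.getD_insert]
    split_ifs <;> simp [hd]

theorem cWT_keys (l : List (String × String)) (d : PySem.Dict String (PySem.Dict String Int)) :
    (cWT d l).keys = PySem.Set.update d.keys (l.map (fun pr => pr.1)) := by
  rw [show cWT d l = l.foldl (fun w pr => w.modify pr.1 PySem.Dict.empty (fun c => cBump c pr.2)) d from rfl]
  exact PySem.Dict.keys_foldl_modify_key l (fun pr => pr.1) PySem.Dict.empty (fun w pr c => cBump c pr.2) d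

theorem tTR_keys (train : List (List (String × String)))
    (w : PySem.Dict String (PySem.Dict String Int)) :
    (tTR w train).keys =
      PySem.Set.update w.keys (train.flatMap (fun s => (sPairs s).map (fun pr => pr.1))) := by
  induction train generalizing w with
  | nil => simp [tTR, PySem.Set.update]
  | cons s tr ih =>
    rw [tTR, List.foldl_cons]
    rw [show tr.foldl (fun w s => cWT w (sPairs s)) (cWT w (sPairs s)) = tTR (cWT w (sPairs s)) tr from rfl]
    rw [ih, cWT_keys]
    simp [PySem.Set.update, List.foldl_append]

theorem count_tags_and_pairs_spec' (train : List (List (String × String))) :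
    count_tags_and_pairs train = count_tags_and_pairs_alt train := by
  simp only [count_tags_and_pairs, count_tags_and_pairs_alt, outerA1, outerA2]
  have h1 : tTC PySem.Dict.empty train
      = PySem.Dict.counter ((train.flatMap (fun s => s)).map (fun x => x.2)) := tTC_eq_counter train
  have h2 : tWT PySem.Dict.empty train = pvGroup (train.flatMap (fun s => s)) := by
    rw [tWT_eq_nest]; exact nest_eq_group _
  have h3 := tTI_eq_counter train
  have h5 := tTM_eq_counter train
  refine Prod.ext (by rw [h1]) (Prod.ext (by rw [h2]) (Prod.ext (by rw [h3]) (Prod.ext ?_ (by rw [h5]; rfl))))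
  -- fourth component: tag_pair_cnt
  show List.map (fun q => (q.1, q.2.items))
      (tTR ((tTC PySem.Dict.empty train).keys.foldl (fun d prev => d.insert prev PySem.Dict.empty) PySem.Dict.empty) train).items =
    List.map (fun q => (q.1, q.2.items))
      ((PySem.Dict.counter ((train.flatMap (fun s => s)).map (fun x => x.2))).keys.foldl
        (fun d t => d.insert t ((pvGroup (train.flatMap (fun s => (s.map (fun x => x.2)).zip ((s.map (fun x => x.2)).drop 1)))).getD t PySem.Dict.empty))
        PySem.Dict.empty).items
  rw [← h1]
  have hTRG : ∀ t, (tTR PySem.Dict.empty train).getD t PySem.Dict.empty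
      = (pvGroup (train.flatMap (fun s => (s.map (fun x => x.2)).zip ((s.map (fun x => x.2)).drop 1)))).getD t PySem.Dict.empty := by
    intro t
    rw [tTR_eq_nest]
    rw [show (train.flatMap (fun s => (s.map (fun x => x.2)).zip ((s.map (fun x => x.2)).drop 1)))
        = train.flatMap sPairs from rfl]
    rw [nest_eq_group]
  set K := (tTC PySem.Dict.empty train).keys with hK
  set D0 := K.foldl (fun d prev => d.insert prev PySem.Dict.empty) PySem.Dict.empty with hD0
  set T := train.flatMap (fun s => s.map (fun x => x.2)) with hTdef
  have hT : K = PySem.Set.ofList T := by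
    rw [hK, tc_keys]
    simp [PySem.Dict.keys_empty, PySem.Set.update_nil_left]
    rw [hTdef]
  have hKnd : K.Nodup := by rw [hT]; exact PySem.Set.nodup_ofList T
  have hmemK : ∀ x, x ∈ T → x ∈ K := by
    intro x hx; rw [hT]; exact (PySem.Set.mem_ofList T x).2 hx
  have hD0keys : D0.keys = K := by
    rw [hD0, PySem.Dict.keys_foldl_insert]
    simp [PySem.Dict.keys_empty, PySem.Set.update_nil_left]
    exact PySem.Set.ofList_eq_self_of_nodup K hKnd
  have hAkeys : (tTR D0 train).keys = K := by
    rw [tTR_keys, hD0keys]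
    refine set_update_of_subset _ _ ?_
    intro x hx
    obtain ⟨s, hs, hx2⟩ := List.mem_flatMap.1 hx
    obtain ⟨pr, hpr, rfl⟩ := List.mem_map.1 hx2
    exact hmemK _ (key_mem train s hs pr hpr)
  have hAnd : (tTR D0 train).keys.Nodup := by rw [hAkeys]; exact hKnd
  have hitemsA : (tTR D0 train).items =
      K.map (fun t => (t, (tTR D0 train).getD t PySem.Dict.empty)) := by
    rw [PySem.Dict.items_eq_map_keys _ hAnd PySem.Dict.empty, hAkeys]
  have hitemsB : (K.foldl (fun d t => d.insert t ((pvGroup (train.flatMap (fun s => (s.map (fun x => x.2)).zip ((s.map (fun x => x.2)).drop 1)))).getD t PySem.Dict.empty)) PySem.Dict.empty).items =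
      K.map (fun t => (t, (pvGroup (train.flatMap (fun s => (s.map (fun x => x.2)).zip ((s.map (fun x => x.2)).drop 1)))).getD t PySem.Dict.empty)) := by
    have hfresh : ∀ t ∈ K, (PySem.Dict.empty : PySem.Dict String (PySem.Dict String Int)).contains ((fun t => t) t) = false := by
      intro t _; simp [PySem.Dict.contains_empty]
    have hnd : (K.map (fun t => t)).Nodup := by simpa using hKnd
    have := PySem.Dict.items_foldl_insert_fresh (l := K) (k := fun t => t)
      (v := fun t => (pvGroup (train.flatMap (fun s => (s.map (fun x => x.2)).zip ((s.map (fun x => x.2)).drop 1)))).getD t PySem.Dict.empty)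
      (d := PySem.Dict.empty) hfresh hnd
    simpa using this
  rw [hitemsA, hitemsB]
  refine congrArg _ (List.map_congr_left ?_)
  intro t _
  have hgd : (tTR D0 train).getD t PySem.Dict.empty =
      (tTR PySem.Dict.empty train).getD t PySem.Dict.empty := by
    refine tTR_getD_congr train _ _ (fun u => ?_) t
    rw [initD_getD, PySem.Dict.getD_empty]
  rw [hgd, hTRG]

-- ===== VERDICT (by name: the statement is the Claim_ definition above) =====
theorem count_tags_and_pairs_spec : Claim_equal_count_tags_and_pairs := by
  intro train _
  unfold Spec_count_tags_and_pairs
  exact count_tags_and_pairs_spec' train
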